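-- pv_equiv track=rewrite | github.com/Marto32/onbelay | agent-harness/src/agent_harness/output_parser.py | _looks_like_file_path
-- ===== SOURCE A (Python) =====
-- def _looks_like_file_path(path: str) -> bool:
--     """Check if a string looks like a file path."""
--     if not path:
--         return False
--
--     # Must have an extension
--     if "." not in path:
--         return False
--
--     # Check for common file extensions
--     common_extensions = {
--         ".py", ".js", ".ts", ".tsx", ".jsx",
--         ".json", ".yaml", ".yml", ".toml",
--         ".md", ".txt", ".rst",
--         ".html", ".css", ".scss",
--         ".sh", ".bash",
--     }
--
--     for ext in common_extensions:
--         if path.endswith(ext):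
--             return True
--
--     return False
-- ===== SOURCE B (Python) =====
-- def _looks_like_file_path(path: str) -> bool:
--     """Check if a string looks like a file path."""
--     _root, sep, ext = path.rpartition(".")
--     return sep == "." and ext in {
--         "py", "js", "ts", "tsx", "jsx",
--         "json", "yaml", "yml", "toml",
--         "md", "txt", "rst",
--         "html", "css", "scss",
--         "sh", "bash",
--     }
-- ===== Notes on version B (the rewrite author's own statement) =====
-- stated objective: idiomatic
-- what changed: B splits off the text after the last dot with str.rpartition and does a single membership test, instead of A's loop testing endswith against all 17 candidate extensions.
import Mathlib
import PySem

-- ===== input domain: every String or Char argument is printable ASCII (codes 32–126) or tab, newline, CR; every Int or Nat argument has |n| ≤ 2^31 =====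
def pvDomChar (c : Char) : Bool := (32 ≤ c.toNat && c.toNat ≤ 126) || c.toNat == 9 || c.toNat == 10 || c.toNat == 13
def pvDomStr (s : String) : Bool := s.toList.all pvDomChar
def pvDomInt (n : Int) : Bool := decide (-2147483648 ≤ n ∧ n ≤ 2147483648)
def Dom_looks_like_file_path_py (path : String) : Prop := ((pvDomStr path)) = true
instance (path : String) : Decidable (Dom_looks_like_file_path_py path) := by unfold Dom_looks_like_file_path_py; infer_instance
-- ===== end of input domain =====

-- B splits off the text after the last dot with rpartition and does one membership test,
-- instead of A's loop testing endswith against all 17 candidate extensions (objective: idiomatic).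

-- ===== PORT A =====
-- 'for ext in common_extensions: if path.endswith(ext): return True' — set iteration
-- (order immaterial: it is an any-match over distinct literals, ported in written order)
def looksA_loop (path : String) : List String → Bool
  | [] => false
  | ext :: rest => if PySem.Str.endswith path ext then true else looksA_loop path rest

def looks_like_file_path_py (path : String) : Bool :=
  if path = "" then false
  else if PySem.Str.isIn "." path = false then false
  else looksA_loop path [".py", ".js", ".ts", ".tsx", ".jsx",
                         ".json", ".yaml", ".yml", ".toml",
                         ".md", ".txt", ".rst",
                         ".html", ".css", ".scss",
                         ".sh", ".bash"]

-- ===== PORT B =====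
-- hand port of str.rpartition(".") (no PySem primitive): the LAST '.' is located as the
-- first '.' of the reversed text; exact for a one-character separator — Python returns
-- ('', '', path) when '.' is absent, and (before, '.', after) split at the last '.' otherwise.
def rpartitionDot (l : List Char) : List Char × List Char × List Char :=
  let j := PySem.Chars.find l.reverse ['.']
  if j < 0 then ([], [], l)
  else ((l.reverse.drop (j.toNat + 1)).reverse, ['.'], (l.reverse.take j.toNat).reverse)

def looks_like_file_path_py_alt (path : String) : Bool :=
  match rpartitionDot path.toList with
  | (_root, sep, ext) =>
    decide (sep = ['.']) &&
      (String.ofList ext ∈ ["py", "js", "ts", "tsx", "jsx",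
                            "json", "yaml", "yml", "toml",
                            "md", "txt", "rst",
                            "html", "css", "scss",
                            "sh", "bash"])

-- ===== PRECONDITION & SPEC =====
def Spec_looks_like_file_path_py (path : String) (out : Bool) : Prop := out = looks_like_file_path_py_alt path
instance (path : String) (out : Bool) : Decidable (Spec_looks_like_file_path_py path out) := by unfold Spec_looks_like_file_path_py; infer_instance

-- ===== CLAIM (what is proved, stated in full; the proofs are below) =====
def Claim_equal_looks_like_file_path_py : Prop := ∀ (path : String), Dom_looks_like_file_path_py path → Spec_looks_like_file_path_py path (looks_like_file_path_py path)

-- ===== LEMMAS AND PROOFS =====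

lemma single_prefix_iff (c : Char) (xs : List Char) : [c] <+: xs ↔ xs.head? = some c := by
  cases xs with
  | nil => simp
  | cons a t => simp [List.cons_prefix_cons, eq_comm]

lemma singleton_infix_iff (c : Char) (xs : List Char) : [c] <:+: xs ↔ c ∈ xs := by
  constructor
  · intro h; exact h.mem (by simp)
  · intro h
    obtain ⟨s, t, hst⟩ := List.append_of_mem h
    exact ⟨s, t, by simp [hst]⟩

lemma looksA_loop_eq_any (path : String) (es : List String) :
    looksA_loop path es = es.any (fun e => PySem.Str.endswith path e) := by
  induction es with
  | nil => rfl
  | cons e rest ih =>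
    cases hE : PySem.Str.endswith path e <;> simp [looksA_loop, ih]

-- the heart: a single-dot extension '.'++name is a suffix of l iff the text after l's
-- last dot is exactly name (given some dot exists and name contains no dot)
lemma ends_dot_iff (l name : List Char) (hn : '.' ∉ name)
    (hf : 0 ≤ PySem.Chars.find l.reverse ['.']) :
    (('.' :: name) <:+ l) ↔ (l.reverse.take (PySem.Chars.find l.reverse ['.']).toNat).reverse = name := by
  obtain ⟨h1, h2⟩ := PySem.Chars.find_spec hf
  set r := l.reverse with hr
  set k := (PySem.Chars.find r ['.']).toNat with hk
  have hrk : r[k]? = some '.' := by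
    rw [← List.head?_drop]; exact (single_prefix_iff _ _).1 h1
  constructor
  · intro h
    have hpre : name.reverse ++ ['.'] <+: r := by
      have := List.reverse_prefix.mpr h
      simpa using this
    obtain ⟨t, ht⟩ := hpre
    have hknl : k = name.length := by
      have hle : k ≤ name.length := by
        by_contra hgt
        refine h2 name.length (Nat.lt_of_not_le hgt) ?_
        refine ⟨t, ?_⟩
        have : r.drop name.length = ('.' :: t) := by
          rw [← ht, List.append_assoc]
          have : name.reverse.length = name.length := by simp
          rw [← this, List.drop_left]
          rfl
        simp [this]
      have hge : name.length ≤ k := by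
        by_contra hlt
        have hlt := Nat.lt_of_not_le hlt
        have hget : r[k]? = name.reverse[k]? := by
          rw [← ht, List.append_assoc, List.getElem?_append_left (by simpa using hlt)]
        rw [hget] at hrk
        have hmem : '.' ∈ name.reverse := List.mem_of_getElem? hrk
        exact hn (by simpa using hmem)
      omega
    have htake : r.take k = name.reverse := by
      rw [hknl, ← ht, List.append_assoc]
      have hlen : name.reverse.length = name.length := by simp
      rw [← hlen, List.take_left]
    rw [htake]; simp
  · intro h
    have htk : r.take k = name.reverse := by rw [← h, List.reverse_reverse]
    obtain ⟨t, ht'⟩ := h1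
    have hpre : name.reverse ++ ['.'] <+: r := by
      refine ⟨t, ?_⟩
      calc (name.reverse ++ ['.']) ++ t = name.reverse ++ (['.'] ++ t) := by
                rw [List.append_assoc]
        _ = r.take k ++ r.drop k := by rw [htk, ht']
        _ = r := List.take_append_drop _ _
    exact List.reverse_prefix.mp (by simpa using hpre)

lemma pair_eq (l : List Char) (ext name : String) (hx : ext.toList = '.' :: name.toList)
    (hn : '.' ∉ name.toList) (hf : 0 ≤ PySem.Chars.find l.reverse ['.']) :
    PySem.Chars.endswith l ext.toList =
      decide (String.ofList ((l.reverse.take (PySem.Chars.find l.reverse ['.']).toNat).reverse) = name) := by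
  rw [hx]
  rw [Bool.eq_iff_iff]
  rw [PySem.Chars.endswith_iff, decide_eq_true_eq, ends_dot_iff _ _ hn hf]
  constructor
  · intro h; rw [h, String.ofList_toList]
  · intro h
    have := congrArg String.toList h
    simpa using this

-- ===== VERDICT (by name: the statement is the Claim_ definition above) =====
theorem looks_like_file_path_py_spec : Claim_equal_looks_like_file_path_py := by
  intro path _
  unfold Spec_looks_like_file_path_py
  unfold looks_like_file_path_py looks_like_file_path_py_alt rpartitionDot
  simp only [looksA_loop_eq_any]
  by_cases hf : 0 ≤ PySem.Chars.find path.toList.reverse ['.']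
  · -- a dot exists: both guards of A pass and the per-extension lemma aligns the disjuncts
    have hinf : ('.' : Char) ∈ path.toList := by
      have := (PySem.Chars.find_nonneg_iff _ _).mp hf
      have := (singleton_infix_iff _ _).mp this
      simpa using this
    have hne : ¬ path = "" := by
      intro h; rw [h] at hinf; simp at hinf
    have hisinC : PySem.Chars.isIn ['.'] path.toList = true :=
      (PySem.Chars.isIn_iff_infix _ _).mpr ((singleton_infix_iff _ _).mpr hinf)
    have hnotlt : ¬ PySem.Chars.find path.toList.reverse ['.'] < 0 := by omega
    rw [if_neg hne, if_neg (by simp [PySem.Str.isIn, hisinC]), if_neg hnotlt]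
    simp only [List.any_cons, List.any_nil, Bool.or_false, PySem.Str.endswith_eq,
      List.mem_cons, List.not_mem_nil, or_false, Bool.decide_or, decide_true, Bool.true_and]
    rw [pair_eq _ ".py" "py" rfl (by decide) hf,
        pair_eq _ ".js" "js" rfl (by decide) hf,
        pair_eq _ ".ts" "ts" rfl (by decide) hf,
        pair_eq _ ".tsx" "tsx" rfl (by decide) hf,
        pair_eq _ ".jsx" "jsx" rfl (by decide) hf,
        pair_eq _ ".json" "json" rfl (by decide) hf,
        pair_eq _ ".yaml" "yaml" rfl (by decide) hf,
        pair_eq _ ".yml" "yml" rfl (by decide) hf,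
        pair_eq _ ".toml" "toml" rfl (by decide) hf,
        pair_eq _ ".md" "md" rfl (by decide) hf,
        pair_eq _ ".txt" "txt" rfl (by decide) hf,
        pair_eq _ ".rst" "rst" rfl (by decide) hf,
        pair_eq _ ".html" "html" rfl (by decide) hf,
        pair_eq _ ".css" "css" rfl (by decide) hf,
        pair_eq _ ".scss" "scss" rfl (by decide) hf,
        pair_eq _ ".sh" "sh" rfl (by decide) hf,
        pair_eq _ ".bash" "bash" rfl (by decide) hf]
  · -- no dot: B's rpartition takes the not-found branch and A's '"." in path' guard fails
    have hlt : PySem.Chars.find path.toList.reverse ['.'] < 0 := by omega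
    have hnin : PySem.Chars.isIn ['.'] path.toList = false := by
      rw [PySem.Chars.isIn_eq_false_iff]
      intro hinfix
      have hmem : ('.' : Char) ∈ path.toList.reverse := by
        simpa using (singleton_infix_iff _ _).mp hinfix
      exact hf ((PySem.Chars.find_nonneg_iff _ _).mpr ((singleton_infix_iff _ _).mpr hmem))
    rw [if_pos hlt]
    simp [PySem.Str.isIn, hnin]
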